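-- pv_equiv track=rewrite | github.com/ke9ora/projet-film | algorithmeRecommandation.py | identifier_films_connus
-- ===== SOURCE A (Python) =====
-- def identifier_films_connus(films_data, titres_connus):
--     """
--     Identifie quels films de films_data sont dans la liste des films connus
--     Retourne un set d'indices des films connus
--     """
--     indices_connus = set()
--
--     for i, film in enumerate(films_data):
--         titre = film.get("titre", "").upper()
--         titre_original = film.get("titre_original", "").upper()
--
--         # Correspondance exacte
--         if titre in titres_connus or titre_original in titres_connus:
--             indices_connus.add(i)
--             continue
--
--         # Correspondance flexible : vérifier si un titre connu contient des mots-clés du film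
--         for titre_connu in titres_connus:
--             # Extraire les mots-clés importants (ignorer les mots courts)
--             mots_film = {m for m in titre.split() if len(m) > 2}
--             mots_connus = {m for m in titre_connu.split() if len(m) > 2}
--             # Si au moins 2 mots en commun, considérer comme match
--             if len(mots_film.intersection(mots_connus)) >= 2:
--                 indices_connus.add(i)
--                 break
--
--     return indices_connus
-- ===== SOURCE B (Python) =====
-- def identifier_films_connus(films_data, titres_connus):
--     """Same result as A, driven by an inverted word->title-ids index instead of
--     rescanning every known title for every film."""
--     # inverted index: significant word (len>2) -> set of known-title ids containing it
--     index = {}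
--     for t, titre_connu in enumerate(titres_connus):
--         for m in titre_connu.split():
--             if len(m) > 2:
--                 index.setdefault(m, set()).add(t)
--     titres_set = set(titres_connus)
--     indices_connus = set()
--     for i, film in enumerate(films_data):
--         titre = film.get("titre", "").upper()
--         titre_original = film.get("titre_original", "").upper()
--         if titre in titres_set or titre_original in titres_set:
--             indices_connus.add(i)
--             continue
--         # count distinct shared significant words per known title
--         counts = {}
--         for m in {m for m in titre.split() if len(m) > 2}:
--             for t in index.get(m, ()):
--                 counts[t] = counts.get(t, 0) + 1
--         if any(c >= 2 for c in counts.values()):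
--             indices_connus.add(i)
--     return indices_connus
-- ===== Notes on version B (the rewrite author's own statement) =====
-- stated objective: faster
-- what changed: B builds an inverted index from each significant word (len>2) of the known titles to the set of known-title ids once, and decides the flexible match per film by incrementing per-title counters over the index hits instead of rescanning (and re-splitting) every known title for every film.
import Mathlib
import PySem

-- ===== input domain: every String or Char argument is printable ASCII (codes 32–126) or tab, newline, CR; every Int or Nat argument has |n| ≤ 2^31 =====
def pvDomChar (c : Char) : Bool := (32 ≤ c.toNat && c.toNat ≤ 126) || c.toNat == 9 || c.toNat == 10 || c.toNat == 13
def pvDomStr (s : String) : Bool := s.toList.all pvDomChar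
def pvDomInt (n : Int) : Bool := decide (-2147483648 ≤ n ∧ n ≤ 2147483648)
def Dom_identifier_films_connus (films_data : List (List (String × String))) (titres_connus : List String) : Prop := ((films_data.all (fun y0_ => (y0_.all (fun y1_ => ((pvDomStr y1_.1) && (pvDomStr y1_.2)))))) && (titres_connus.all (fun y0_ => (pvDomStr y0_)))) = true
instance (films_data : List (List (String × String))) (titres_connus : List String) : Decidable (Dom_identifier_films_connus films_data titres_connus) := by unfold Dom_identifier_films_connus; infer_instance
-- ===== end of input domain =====

-- B replaces A's rescan of every known title per film by an inverted word→title-ids index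
-- built once, with per-title counters of shared significant words (objective: faster,
-- measured).

-- film.get(key, "") on the film dict (association list, first-match lookup)
def pvGetStr (film : List (String × String)) (key : String) : String :=
  (PySem.Dict.mk film).getD key ""

-- {m for m in s.split() if len(m) > 2}  (this set comprehension appears verbatim in both programs)
def pvMots (s : String) : PySem.Set String :=
  PySem.Set.ofList ((PySem.Str.split₀ s).filter (fun m => decide (2 < PySem.Str.len m)))

-- ===== PORT A =====
-- inner 'for titre_connu in titres_connus: … break' loop, as a Bool (break ⇔ true)
def pvFlexA (titre : String) : List String → Bool
  | [] => false
  | titre_connu :: rest =>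
      let mots_film := pvMots titre
      let mots_connus := pvMots titre_connu
      if 2 ≤ PySem.Set.len (PySem.Set.inter mots_film mots_connus) then true
      else pvFlexA titre rest

def pvLoopA (titres_connus : List String) :
    List (List (String × String)) → Int → PySem.Set Int → PySem.Set Int
  | [], _, acc => acc
  | film :: rest, i, acc =>
      let titre := PySem.Str.upper (pvGetStr film "titre")
      let titre_original := PySem.Str.upper (pvGetStr film "titre_original")
      if titres_connus.contains titre || titres_connus.contains titre_original then
        pvLoopA titres_connus rest (i + 1) (PySem.Set.add acc i)
      else if pvFlexA titre titres_connus then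
        pvLoopA titres_connus rest (i + 1) (PySem.Set.add acc i)
      else
        pvLoopA titres_connus rest (i + 1) acc

def identifier_films_connus (films_data : List (List (String × String))) (titres_connus : List String) : List Int :=
  pvLoopA titres_connus films_data 0 PySem.Set.empty

-- ===== PORT B =====
-- inverted index: significant word → set of known-title ids (index.setdefault(m, set()).add(t))
def pvIndexB : List String → Int → PySem.Dict String (PySem.Set Int) → PySem.Dict String (PySem.Set Int)
  | [], _, index => index
  | titre_connu :: rest, t, index =>
      pvIndexB rest (t + 1)
        ((PySem.Str.split₀ titre_connu).foldl
          (fun index m =>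
            if 2 < PySem.Str.len m then index.modify m PySem.Set.empty (fun s => PySem.Set.add s t)
            else index) index)

-- counts[t] = counts.get(t, 0) + 1 for each t in index.get(m, ()) for each word m of the film
def pvCountsB (index : PySem.Dict String (PySem.Set Int)) (mots : List String) : PySem.Dict Int Int :=
  mots.foldl
    (fun counts m =>
      (index.getD m PySem.Set.empty).foldl (fun counts t => counts.modify t 0 (· + 1)) counts)
    PySem.Dict.empty

def pvLoopB (index : PySem.Dict String (PySem.Set Int)) (titres_set : PySem.Set String) :
    List (List (String × String)) → Int → PySem.Set Int → PySem.Set Int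
  | [], _, acc => acc
  | film :: rest, i, acc =>
      let titre := PySem.Str.upper (pvGetStr film "titre")
      let titre_original := PySem.Str.upper (pvGetStr film "titre_original")
      if titres_set.contains titre || titres_set.contains titre_original then
        pvLoopB index titres_set rest (i + 1) (PySem.Set.add acc i)
      else if (pvCountsB index (pvMots titre)).values.any (fun c => 2 ≤ c) then
        pvLoopB index titres_set rest (i + 1) (PySem.Set.add acc i)
      else
        pvLoopB index titres_set rest (i + 1) acc

def identifier_films_connus_alt (films_data : List (List (String × String))) (titres_connus : List String) : List Int :=
  pvLoopB (pvIndexB titres_connus 0 PySem.Dict.empty) (PySem.Set.ofList titres_connus)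
    films_data 0 PySem.Set.empty

-- ===== PRECONDITION & SPEC =====
def Spec_identifier_films_connus (films_data : List (List (String × String))) (titres_connus : List String) (out : List Int) : Prop := out = identifier_films_connus_alt films_data titres_connus
instance (films_data : List (List (String × String))) (titres_connus : List String) (out : List Int) : Decidable (Spec_identifier_films_connus films_data titres_connus out) := by unfold Spec_identifier_films_connus; infer_instance

-- ===== CLAIM (what is proved, stated in full; the proofs are below) =====
def Claim_equal_identifier_films_connus : Prop := ∀ (films_data : List (List (String × String))) (titres_connus : List String), Dom_identifier_films_connus films_data titres_connus → Spec_identifier_films_connus films_data titres_connus (identifier_films_connus films_data titres_connus)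

-- ===== LEMMAS AND PROOFS =====

-- the list of significant words of a title, in split order (pvMots s = Set.ofList (pvSig s))
def pvSig (s : String) : List String :=
  (PySem.Str.split₀ s).filter (fun m => decide (2 < PySem.Str.len m))

-- one title's pass over its words, as seen through getD
theorem pvStep_getD (t : Int) (m : String) : ∀ (l : List String) (d : PySem.Dict String (PySem.Set Int)),
    (l.foldl (fun index w =>
        if 2 < PySem.Str.len w then index.modify w PySem.Set.empty (fun s => PySem.Set.add s t)
        else index) d).getD m PySem.Set.empty =
      if m ∈ l.filter (fun w => decide (2 < PySem.Str.len w)) then (d.getD m PySem.Set.empty).add t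
      else d.getD m PySem.Set.empty := by
  intro l
  induction l with
  | nil => simp
  | cons w rest ih =>
      intro d
      simp only [List.foldl_cons]
      by_cases hlen : 2 < PySem.Str.len w
      · simp only [hlen, if_pos, ih, List.filter_cons, decide_true, List.mem_cons]
        rw [PySem.Dict.getD_modify]
        by_cases hw : m = w
        · subst hw
          by_cases hr : m ∈ rest.filter (fun w => decide (2 < PySem.Str.len w)) <;>
            simp
        · simp [hw]
      · simp only [hlen, if_neg, ih, List.filter_cons, not_false_eq_true]
        simp

-- membership in the index built from position t₀
theorem pvIndex_mem (ts : List String) : ∀ (t₀ : Int) (d : PySem.Dict String (PySem.Set Int))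
    (m : String) (t : Int),
    t ∈ (pvIndexB ts t₀ d).getD m PySem.Set.empty ↔
      t ∈ d.getD m PySem.Set.empty ∨
        ∃ j : Nat, ∃ h : j < ts.length, t = t₀ + j ∧ m ∈ pvSig ts[j] := by
  induction ts with
  | nil => simp [pvIndexB]
  | cons tc rest ih =>
      intro t₀ d m t
      rw [pvIndexB, ih, pvStep_getD]
      constructor
      · rintro (h | ⟨j, hj, rfl, hm⟩)
        · by_cases hc : m ∈ (PySem.Str.split₀ tc).filter (fun w => decide (2 < PySem.Str.len w))
          · rw [if_pos hc] at h
            rcases (PySem.Set.mem_add _ _ _).mp h with h | rfl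
            · exact Or.inl h
            · exact Or.inr ⟨0, by simp, by simp, by simpa [pvSig] using hc⟩
          · rw [if_neg hc] at h; exact Or.inl h
        · exact Or.inr ⟨j + 1, by simpa using hj, by push_cast; ring, by simpa using hm⟩
      · rintro (h | ⟨j, hj, rfl, hm⟩)
        · left
          split
          · exact (PySem.Set.mem_add _ _ _).mpr (Or.inl h)
          · exact h
        · match j with
          | 0 =>
              left
              rw [if_pos (by simpa [pvSig] using hm)]
              exact (PySem.Set.mem_add _ _ _).mpr (Or.inr (by simp))
          | j + 1 =>
              right
              exact ⟨j, by simpa using hj, by push_cast; ring, by simpa using hm⟩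

theorem pvIndex_nodup (ts : List String) : ∀ (t₀ : Int) (d : PySem.Dict String (PySem.Set Int))
    (m : String), (d.getD m PySem.Set.empty).Nodup →
    ((pvIndexB ts t₀ d).getD m PySem.Set.empty).Nodup := by
  induction ts with
  | nil => intro _ _ _ h; simpa [pvIndexB] using h
  | cons tc rest ih =>
      intro t₀ d m h
      rw [pvIndexB]
      apply ih
      rw [pvStep_getD]
      split
      · exact PySem.Set.nodup_add _ _ h
      · exact h

-- counts as a sum of per-word occurrence counts
theorem pvCounts_getD (index : PySem.Dict String (PySem.Set Int)) (W : List String) :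
    ∀ (c : PySem.Dict Int Int) (t : Int),
    (W.foldl
        (fun counts m =>
          (index.getD m PySem.Set.empty).foldl (fun counts u => counts.modify u 0 (· + 1)) counts)
        c).getD t 0 =
      c.getD t 0 + ((W.map (fun m => ((index.getD m PySem.Set.empty).count t : Int))).sum) := by
  induction W with
  | nil => simp
  | cons w rest ih =>
      intro c t
      simp only [List.foldl_cons, ih, List.map_cons, List.sum_cons,
        PySem.Dict.getD_foldl_modify_add_one]
      ring

theorem pvCounts_keys_nodup (index : PySem.Dict String (PySem.Set Int)) (W : List String) :
    ∀ (c : PySem.Dict Int Int), c.keys.Nodup →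
    (W.foldl
        (fun counts m =>
          (index.getD m PySem.Set.empty).foldl (fun counts u => counts.modify u 0 (· + 1)) counts)
        c).keys.Nodup := by
  induction W with
  | nil => intro c h; simpa using h
  | cons w rest ih =>
      intro c h
      simp only [List.foldl_cons]
      apply ih
      rw [PySem.Dict.keys_foldl_modify (f := fun _ _ => (· + 1))]
      exact PySem.Set.nodup_update _ _ h

theorem pvFlexA_any (titre : String) (ts : List String) :
    pvFlexA titre ts =
      ts.any (fun tc => decide (2 ≤ PySem.Set.len (PySem.Set.inter (pvMots titre) (pvMots tc)))) := by
  induction ts with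
  | nil => rfl
  | cons tc rest ih =>
      rw [pvFlexA, List.any_cons, ← ih]
      simp

-- len of A's intersection as a countP over the film's word list
theorem pvLenInter (W : PySem.Set String) (tc : String) :
    PySem.Set.len (PySem.Set.inter W (pvMots tc)) =
      ((W : List String).countP (fun m => decide (m ∈ pvSig tc)) : Int) := by
  simp only [PySem.Set.len, PySem.Set.inter, ← List.countP_eq_length_filter]
  congr 1
  apply List.countP_congr
  intro m _
  simp [pvMots, PySem.Set.mem_ofList, pvSig]

theorem pvCountsB_getD (index : PySem.Dict String (PySem.Set Int)) (W : List String) (t : Int)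
    (hnd : ∀ m, ((index.getD m PySem.Set.empty) : List Int).Nodup) :
    (pvCountsB index W).getD t 0 =
      (W.countP (fun m => decide (t ∈ index.getD m PySem.Set.empty)) : Int) := by
  rw [pvCountsB, pvCounts_getD, PySem.Dict.getD_empty, zero_add]
  rw [show (W.map (fun m => ((index.getD m PySem.Set.empty).count t : Int))) =
      (W.map (fun m => if (fun m => decide (t ∈ index.getD m PySem.Set.empty)) m = true then 1 else 0)) from ?_]
  · exact PySem.List.sum_map_ite_one_zero _ W
  · apply List.map_congr_left
    intro m _
    by_cases h : t ∈ index.getD m PySem.Set.empty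
    · have h' : t ∈ index.getD m ([] : List Int) := h
      rw [List.count_eq_one_of_mem (hnd m) h]; simp [h']
    · have h' : t ∉ index.getD m ([] : List Int) := h
      rw [List.count_eq_zero_of_not_mem h]; simp [h']

theorem pvValuesAny (c : PySem.Dict Int Int) (hk : c.keys.Nodup) :
    (c.values.any (fun v => 2 ≤ v) = true) ↔ ∃ k : Int, 2 ≤ c.getD k 0 := by
  rw [PySem.Dict.values_eq_map_keys c hk 0]
  simp only [List.any_eq_true, List.mem_map]
  constructor
  · rintro ⟨v, ⟨k, _, rfl⟩, hv⟩
    exact ⟨k, by simpa using hv⟩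
  · rintro ⟨k, hv⟩
    by_cases hmem : k ∈ c.keys
    · exact ⟨c.getD k 0, ⟨k, hmem, rfl⟩, by simpa using hv⟩
    · rw [PySem.Dict.getD_eq_get?_getD,
        (PySem.Dict.get?_eq_none_iff_not_mem_keys c k).mpr hmem] at hv
      simp at hv

theorem pvIndex_mem_empty (ts : List String) (m : String) (t : Int) :
    t ∈ (pvIndexB ts 0 PySem.Dict.empty).getD m PySem.Set.empty ↔
      ∃ j : Nat, ∃ h : j < ts.length, t = j ∧ m ∈ pvSig ts[j] := by
  rw [pvIndex_mem]
  simp [PySem.Dict.getD_empty]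

theorem pvCountP_at (ts : List String) (W : List String) (j : Nat) (hj : j < ts.length) :
    W.countP (fun m => decide ((j : Int) ∈ (pvIndexB ts 0 PySem.Dict.empty).getD m PySem.Set.empty)) =
      W.countP (fun m => decide (m ∈ pvSig ts[j])) := by
  apply List.countP_congr
  intro m _
  simp only [decide_eq_true_eq, pvIndex_mem_empty]
  constructor
  · rintro ⟨j', hj', heq, hm⟩
    have : j' = j := by exact_mod_cast heq.symm
    subst this; exact hm
  · intro hm; exact ⟨j, hj, rfl, hm⟩

-- the flexible-match decision agrees between the two programs
theorem pvFlex_eq (ts : List String) (titre : String) :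
    pvFlexA titre ts =
      (pvCountsB (pvIndexB ts 0 PySem.Dict.empty) (pvMots titre)).values.any (fun c => 2 ≤ c) := by
  have hndidx : ∀ m, (((pvIndexB ts 0 PySem.Dict.empty).getD m PySem.Set.empty) : List Int).Nodup := by
    intro m
    exact pvIndex_nodup ts 0 _ m (by rw [PySem.Dict.getD_empty]; exact List.nodup_nil)
  have hkeys : (pvCountsB (pvIndexB ts 0 PySem.Dict.empty) (pvMots titre)).keys.Nodup :=
    pvCounts_keys_nodup _ _ _ PySem.Dict.nodup_keys_empty
  rw [pvFlexA_any, Bool.eq_iff_iff, List.any_eq_true, pvValuesAny _ hkeys]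
  constructor
  · rintro ⟨tc, htc, hlen⟩
    rw [decide_eq_true_eq, pvLenInter] at hlen
    obtain ⟨j, hj, rfl⟩ := List.mem_iff_getElem.mp htc
    refine ⟨(j : Int), ?_⟩
    rw [pvCountsB_getD _ _ _ hndidx, pvCountP_at ts _ j hj]
    exact hlen
  · rintro ⟨k, hk⟩
    rw [pvCountsB_getD _ _ _ hndidx] at hk
    have hpos : 0 < (pvMots titre : List String).countP
        (fun m => decide (k ∈ (pvIndexB ts 0 PySem.Dict.empty).getD m PySem.Set.empty)) := by
      omega
    obtain ⟨m, _, hm⟩ := List.countP_pos_iff.mp hpos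
    rw [decide_eq_true_eq, pvIndex_mem_empty] at hm
    obtain ⟨j, hj, rfl, _⟩ := hm
    refine ⟨ts[j], List.getElem_mem hj, ?_⟩
    rw [decide_eq_true_eq, pvLenInter]
    rw [pvCountP_at ts _ j hj] at hk
    exact hk

-- exact-match test: list membership vs membership in set(titres_connus)
theorem pvContains_eq (ts : List String) (x : String) :
    ts.contains x = (PySem.Set.ofList ts).contains x := by
  rw [PySem.Set.contains_eq_listContains]
  simp [List.contains_eq_mem, PySem.Set.mem_ofList]

theorem pvLoop_eq (ts : List String) (films : List (List (String × String))) :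
    ∀ (i : Int) (acc : PySem.Set Int),
    pvLoopA ts films i acc =
      pvLoopB (pvIndexB ts 0 PySem.Dict.empty) (PySem.Set.ofList ts) films i acc := by
  induction films with
  | nil => intro i acc; rfl
  | cons film rest ih =>
      intro i acc
      rw [pvLoopA, pvLoopB]
      simp only [← pvContains_eq, ← pvFlex_eq, ih]

-- ===== VERDICT (by name: the statement is the Claim_ definition above) =====
theorem identifier_films_connus_spec : Claim_equal_identifier_films_connus := by
  intro films_data titres_connus _
  unfold Spec_identifier_films_connus identifier_films_connus identifier_films_connus_alt
  exact pvLoop_eq _ _ _ _
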